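-- pv_equiv track=rewrite | github.com/RafailSkoulos17/cyber_data_analytics | anomaly_detection/comparison.py | find_anomaly_blocks
-- ===== SOURCE A (Python) =====
-- def find_anomaly_blocks(anomaly_labels):
--     """
--     Function that finds the blocks during which an attack occurred
--     :param anomaly_labels: the labels of the time series 0 -> normal 1 -> attack
--     :return: a list of tuples with the starting and ending indexes of each attack
--     """
--     anomaly_blocks = []
--     prev = 0
--     start = 0
--     for ind, label in enumerate(anomaly_labels):
--         if label == 1 and prev != 1:  # check when a new attack occurs
--             start = ind
--         elif label != 1 and prev == 1:  # check when an attack ends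
--             anomaly_blocks += [(start, ind)]
--         prev = label
--     return anomaly_blocks
-- ===== SOURCE B (Python) =====
-- def find_anomaly_blocks(anomaly_labels):
--     """
--     Function that finds the blocks during which an attack occurred
--     :param anomaly_labels: the labels of the time series 0 -> normal 1 -> attack
--     :return: a list of tuples with the starting and ending indexes of each attack
--     """
--     # pair each label with its predecessor (sentinel 0 before the first one)
--     pairs = list(zip([0] + list(anomaly_labels), anomaly_labels))
--     starts = [i for i, (p, l) in enumerate(pairs) if l == 1 and p != 1]
--     ends = [i for i, (p, l) in enumerate(pairs) if l != 1 and p == 1]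
--     return list(zip(starts, ends))
-- ===== Notes on version B (the rewrite author's own statement) =====
-- stated objective: idiomatic
-- what changed: Replaced the stateful prev/start accumulator loop by two declarative index comprehensions over (previous,label) pairs (block starts and block ends) zipped together, letting zip truncation drop an unclosed trailing block.
import Mathlib
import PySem

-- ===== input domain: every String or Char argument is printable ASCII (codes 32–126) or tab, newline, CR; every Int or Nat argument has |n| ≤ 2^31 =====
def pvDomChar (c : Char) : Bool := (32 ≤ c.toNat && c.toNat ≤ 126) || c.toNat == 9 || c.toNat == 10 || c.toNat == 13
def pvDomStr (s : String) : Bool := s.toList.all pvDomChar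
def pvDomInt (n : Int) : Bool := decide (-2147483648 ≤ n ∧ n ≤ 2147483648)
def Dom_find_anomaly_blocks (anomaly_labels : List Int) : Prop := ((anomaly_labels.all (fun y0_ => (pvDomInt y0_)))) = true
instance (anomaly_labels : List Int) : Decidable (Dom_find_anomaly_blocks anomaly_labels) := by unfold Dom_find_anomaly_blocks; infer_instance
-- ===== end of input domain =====

-- B replaces A's stateful prev/start loop by two index comprehensions (block starts and
-- block ends over predecessor/label pairs) zipped together; objective: idiomatic.


-- ===== PORT A =====
-- state = (anomaly_blocks, prev, start)
def pvStepA (st : List (Int × Int) × Int × Int) (p : Int × Int) : List (Int × Int) × Int × Int :=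
  if p.2 == 1 && st.2.1 != 1 then (st.1, p.2, p.1)
  else if p.2 != 1 && st.2.1 == 1 then (st.1 ++ [(st.2.2, p.1)], p.2, st.2.2)
  else (st.1, p.2, st.2.2)

def find_anomaly_blocks (anomaly_labels : List Int) : List (Int × Int) :=
  ((PySem.List.enumerate anomaly_labels 0).foldl pvStepA ([], 0, 0)).1

-- ===== PORT B =====
def find_anomaly_blocks_alt (anomaly_labels : List Int) : List (Int × Int) :=
  let pairs := List.zip ((0 : Int) :: anomaly_labels) anomaly_labels
  let starts := (PySem.List.enumerate pairs 0).filterMap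
    (fun e => if e.2.2 == 1 && e.2.1 != 1 then some e.1 else none)
  let ends := (PySem.List.enumerate pairs 0).filterMap
    (fun e => if e.2.2 != 1 && e.2.1 == 1 then some e.1 else none)
  List.zip starts ends

-- ===== PRECONDITION & SPEC =====
def Spec_find_anomaly_blocks (anomaly_labels : List Int) (out : List (Int × Int)) : Prop := out = find_anomaly_blocks_alt anomaly_labels
instance (anomaly_labels : List Int) (out : List (Int × Int)) : Decidable (Spec_find_anomaly_blocks anomaly_labels out) := by unfold Spec_find_anomaly_blocks; infer_instance

-- ===== CLAIM (what is proved, stated in full; the proofs are below) =====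
def Claim_equal_find_anomaly_blocks : Prop := ∀ (anomaly_labels : List Int), Dom_find_anomaly_blocks anomaly_labels → Spec_find_anomaly_blocks anomaly_labels (find_anomaly_blocks anomaly_labels)

-- ===== LEMMAS AND PROOFS =====

-- reference recursions for the start/end index lists
def pvStarts (p k : Int) : List Int → List Int
  | [] => []
  | l :: r => if l = 1 ∧ p ≠ 1 then k :: pvStarts l (k+1) r else pvStarts l (k+1) r

def pvEnds (p k : Int) : List Int → List Int
  | [] => []
  | l :: r => if l ≠ 1 ∧ p = 1 then k :: pvEnds l (k+1) r else pvEnds l (k+1) r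

theorem foldA_eq (rest : List Int) : ∀ (k p s : Int) (blocks : List (Int × Int)),
    ((PySem.List.enumerate rest k).foldl pvStepA (blocks, p, s)).1
      = blocks ++ List.zip (if p = 1 then s :: pvStarts p k rest else pvStarts p k rest) (pvEnds p k rest) := by
  induction rest with
  | nil => intro k p s blocks; simp [PySem.List.enumerate_nil, pvStarts, pvEnds]
  | cons l r ih =>
    intro k p s blocks
    simp only [PySem.List.enumerate_cons, List.foldl_cons]
    by_cases hp : p = 1 <;> by_cases hl : l = 1 <;>
      simp [pvStepA, pvStarts, pvEnds, hp, hl, ih]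

theorem starts_eq (rest : List Int) : ∀ (p k : Int),
    (PySem.List.enumerate (List.zip (p :: rest) rest) k).filterMap
      (fun e => if e.2.2 == 1 && e.2.1 != 1 then some e.1 else none)
      = pvStarts p k rest := by
  induction rest with
  | nil => intro p k; simp [PySem.List.enumerate_nil, pvStarts]
  | cons l r ih =>
    intro p k
    simp only [List.zip_cons_cons, PySem.List.enumerate_cons, List.filterMap_cons, ih]
    by_cases hp : p = 1 <;> by_cases hl : l = 1 <;>
      simp [pvStarts, hp, hl]

theorem ends_eq (rest : List Int) : ∀ (p k : Int),
    (PySem.List.enumerate (List.zip (p :: rest) rest) k).filterMap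
      (fun e => if e.2.2 != 1 && e.2.1 == 1 then some e.1 else none)
      = pvEnds p k rest := by
  induction rest with
  | nil => intro p k; simp [PySem.List.enumerate_nil, pvEnds]
  | cons l r ih =>
    intro p k
    simp only [List.zip_cons_cons, PySem.List.enumerate_cons, List.filterMap_cons, ih]
    by_cases hp : p = 1 <;> by_cases hl : l = 1 <;>
      simp [pvEnds, hp, hl]

-- ===== VERDICT (by name: the statement is the Claim_ definition above) =====
theorem find_anomaly_blocks_spec : Claim_equal_find_anomaly_blocks := by
  intro xs _
  show find_anomaly_blocks xs = find_anomaly_blocks_alt xs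
  simp only [find_anomaly_blocks, find_anomaly_blocks_alt, foldA_eq, starts_eq, ends_eq]
  norm_num
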